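-- pv_equiv track=rewrite | github.com/madhur3u/HackerRank | GFG/Count_occ_of_anagrams.py | search_anagram
-- ===== SOURCE A (Python) =====
-- def search_anagram(word , text):
--
--     len_word = len(word)                            # taking length of both word and text
--     len_text = len(text)
--
--     word_count = [0]*128                            # store count of all words in word
--     text_count = [0]*128                            # this will store count of text in current window only
--
--     count = 0
--
--     for i in range(len_word):                       # 1st we traverse in word to make our word_count which will store count of all words in word
--
--         word_count[ord(word[i])] += 1               # taking ASCII value as index ++ the value at that INDEX
--         text_count[ord(text[i])] += 1               # we will also make text_count for current window by same method
--
-- # current window, or no. of elements in text_count which will be ++ will always equal to len_word, this is the reason we made our 1st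
-- # array in last for-loop only where we were making word_count,
--
--     if word_count == text_count :                   # now we will compare both arrays, if equal means anagram is found
--         count += 1
--
--     for i in range(len_word, len_text) :            # this array will fo from len_word till end
--
--         text_count[ord(text[i])] += 1               # ASCII ++
--         text_count[ord(text[i - len_word])] -= 1    # this will delete the value which is now not needed, as in a window we will compare only len_word elements
--
--         if word_count == text_count :               # if both array equal means anagram found
--             count += 1
--
--     return count
-- ===== SOURCE B (Python) =====
-- # Sliding window over a single word-minus-window difference dict with a running
-- # count of mismatched characters, instead of A's two 128-slot count arrays
-- # compared wholesale at every step. Returns 0 (instead of A's IndexError)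
-- # when the word is longer than the text.
--
-- def _adjust(diff, c, delta, mismatched):
--     old = diff.get(c, 0)
--     new = old + delta
--     diff[c] = new
--     if old == 0 and new != 0:
--         mismatched += 1
--     elif old != 0 and new == 0:
--         mismatched -= 1
--     return mismatched
--
-- def search_anagram(word, text):
--     m = len(word)
--     if m > len(text):
--         return 0
--     diff = {}
--     mismatched = 0
--     for c in word:
--         mismatched = _adjust(diff, c, 1, mismatched)
--     for c in text[:m]:
--         mismatched = _adjust(diff, c, -1, mismatched)
--     count = 1 if mismatched == 0 else 0
--     for c_in, c_out in zip(text[m:], text):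
--         mismatched = _adjust(diff, c_in, -1, mismatched)
--         mismatched = _adjust(diff, c_out, 1, mismatched)
--         if mismatched == 0:
--             count += 1
--     return count
-- ===== Notes on version B (the rewrite author's own statement) =====
-- stated objective: alternative
-- what changed: Replaces the pair of 128-slot ASCII count arrays compared wholesale at every window with a single word-minus-window difference dict plus a running mismatched-character counter updated per slide; B also returns 0 instead of raising IndexError when the word is longer than the text.
import Mathlib
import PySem

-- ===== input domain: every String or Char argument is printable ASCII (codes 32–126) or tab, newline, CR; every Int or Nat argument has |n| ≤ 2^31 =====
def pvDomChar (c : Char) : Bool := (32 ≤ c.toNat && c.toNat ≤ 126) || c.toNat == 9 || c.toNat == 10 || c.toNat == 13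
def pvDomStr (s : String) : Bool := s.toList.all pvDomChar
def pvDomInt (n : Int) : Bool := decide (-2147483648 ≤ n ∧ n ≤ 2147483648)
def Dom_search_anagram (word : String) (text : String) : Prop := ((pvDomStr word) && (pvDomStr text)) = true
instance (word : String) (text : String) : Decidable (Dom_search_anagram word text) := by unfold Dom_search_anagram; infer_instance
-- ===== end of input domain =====

-- B replaces A's two 128-slot count arrays (compared wholesale per window) with one
-- word-minus-window difference dict plus a running mismatched-character counter.

-- ===== PORT A =====
-- a[i] += delta on a count array (in-range index under Dom: all char codes < 128)
def pvBump (a : List Int) (i : Nat) (delta : Int) : List Int := a.set i (a.getD i 0 + delta)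

def search_anagram (word : String) (text : String) : Int :=
  let w := word.toList
  let t := text.toList
  let lenWord := w.length
  let lenText := t.length
  -- for i in range(len_word): word_count[ord(word[i])] += 1; text_count[ord(text[i])] += 1
  let p := (PySem.List.pyRange 0 lenWord 1).foldl
      (fun (p : List Int × List Int) i =>
        (pvBump p.1 (PySem.List.pyGetD w i ' ').toNat 1,
         pvBump p.2 (PySem.List.pyGetD t i ' ').toNat 1))
      (List.replicate 128 0, List.replicate 128 0)
  let wordCount := p.1
  let count0 : Int := if wordCount == p.2 then 1 else 0
  -- for i in range(len_word, len_text): slide the window, compare the arrays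
  let q := (PySem.List.pyRange lenWord lenText 1).foldl
      (fun (q : List Int × Int) i =>
        let tc := pvBump q.1 (PySem.List.pyGetD t i ' ').toNat 1
        let tc2 := pvBump tc (PySem.List.pyGetD t (i - lenWord) ' ').toNat (-1)
        (tc2, if wordCount == tc2 then q.2 + 1 else q.2))
      (p.2, count0)
  q.2

-- ===== PORT B =====
-- _adjust(diff, c, delta, mismatched) from Source B
def pvAdjust (diff : PySem.Dict Char Int) (mis : Int) (c : Char) (delta : Int) :
    PySem.Dict Char Int × Int :=
  let old := diff.getD c 0
  let nw := old + delta
  (diff.insert c nw,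
   if old == 0 && !(nw == 0) then mis + 1
   else if !(old == 0) && nw == 0 then mis - 1
   else mis)

def search_anagram_alt (word : String) (text : String) : Int :=
  let w := word.toList
  let t := text.toList
  let m := w.length
  if m > t.length then 0
  else
    let s1 := w.foldl (fun s c => pvAdjust s.1 s.2 c 1) (PySem.Dict.empty, 0)
    let s2 := (PySem.List.slice t none (some (m : Int))).foldl
        (fun s c => pvAdjust s.1 s.2 c (-1)) s1
    let count0 : Int := if s2.2 == 0 then 1 else 0
    let r := ((PySem.List.slice t (some (m : Int)) none).zip t).foldl
        (fun (r : (PySem.Dict Char Int × Int) × Int) pr =>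
          let s := pvAdjust r.1.1 r.1.2 pr.1 (-1)
          let s' := pvAdjust s.1 s.2 pr.2 1
          (s', if s'.2 == 0 then r.2 + 1 else r.2))
        (s2, count0)
    r.2

-- ===== PRECONDITION & SPEC =====
-- Pre_ excludes len(word) > len(text), where A raises IndexError (first loop reads text[i] past the end).
def Pre_search_anagram (word : String) (text : String) : Prop :=
  word.toList.length ≤ text.toList.length
instance (word : String) (text : String) : Decidable (Pre_search_anagram word text) := by
  unfold Pre_search_anagram; infer_instance

def pvWitness_search_anagram : String × String := ("ab", "cabba")

def Spec_search_anagram (word : String) (text : String) (out : Int) : Prop :=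
  out = search_anagram_alt word text
instance (word : String) (text : String) (out : Int) : Decidable (Spec_search_anagram word text out) := by
  unfold Spec_search_anagram; infer_instance

-- ===== CLAIM (what is proved, stated in full; the proofs are below) =====
def Claim_equal_search_anagram : Prop := ∀ (word : String) (text : String),
  Dom_search_anagram word text → Pre_search_anagram word text →
  Spec_search_anagram word text (search_anagram word text)

-- ===== LEMMAS AND PROOFS =====

-- the 128-slot count array of an abstract count function
def mkArr (f : Char → Int) : List Int := (List.range 128).map (fun i => f (Char.ofNat i))

-- the B-side state invariant: dict = pointwise f, mis = number of nonzero entries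
def DInv (d : PySem.Dict Char Int) (mis : Int) (f : Char → Int) : Prop :=
  d.keys.Nodup ∧ (∀ c, d.getD c 0 = f c) ∧
  mis = ((d.items.countP (fun p => !(p.2 == 0))) : Int)

lemma toNat_ofNat_lt (i : Nat) (h : i < 128) : (Char.ofNat i).toNat = i := by
  have hv : i.isValidChar := Or.inl (by omega)
  simp [Char.ofNat, hv]

lemma mkArr_getD (f : Char → Int) (c : Char) (h : c.toNat < 128) :
    (mkArr f).getD c.toNat 0 = f c := by
  simp [mkArr, List.getD, List.getElem?_map, List.getElem?_range, h, Char.ofNat_toNat]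

lemma pvBump_mkArr (f : Char → Int) (c : Char) (h : c.toNat < 128) (δ : Int) :
    pvBump (mkArr f) c.toNat δ = mkArr (Function.update f c (f c + δ)) := by
  unfold pvBump
  rw [mkArr_getD f c h]
  apply List.ext_getElem
  · simp [mkArr]
  · intro i h1 h2
    have hi : i < 128 := by simpa [mkArr] using h2
    rw [List.getElem_set]
    simp only [mkArr, List.getElem_map, List.getElem_range]
    by_cases hic : c.toNat = i
    · subst hic
      simp [Char.ofNat_toNat, Function.update]
    · have : Char.ofNat i ≠ c := by
        intro hh; apply hic; rw [← hh, toNat_ofNat_lt i hi]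
      simp [hic, Function.update, this]

lemma mkArr_congr {f g : Char → Int} (h : ∀ c, f c = g c) : mkArr f = mkArr g := by
  simp [mkArr]; intro i _; exact h _

lemma mkArr_beq (f g : Char → Int) :
    (mkArr f == mkArr g) = true ↔ ∀ c : Char, c.toNat < 128 → f c = g c := by
  rw [beq_iff_eq]
  constructor
  · intro h c hc
    have := congrArg (fun l => l.getD c.toNat 0) h
    simp only at this
    rwa [mkArr_getD f c hc, mkArr_getD g c hc] at this
  · intro h
    apply List.ext_getElem
    · simp [mkArr]
    · intro i h1 h2
      have hi : i < 128 := by simpa [mkArr] using h1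
      simp only [mkArr, List.getElem_map, List.getElem_range]
      exact h _ (by rw [toNat_ofNat_lt i hi]; exact hi)

lemma replicate_eq_mkArr : List.replicate 128 (0 : Int) = mkArr (fun _ => 0) := by
  simp [mkArr, List.map_const']

lemma DInv_congr {d mis} {f g : Char → Int} (h : DInv d mis f) (hfg : ∀ c, f c = g c) :
    DInv d mis g := ⟨h.1, fun c => (h.2.1 c).trans (hfg c), h.2.2⟩

lemma DInv_empty : DInv PySem.Dict.empty 0 (fun _ => 0) := by
  refine ⟨?_, ?_, ?_⟩ <;> simp [PySem.Dict.keys_empty, PySem.Dict.getD_empty]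

-- replacing the unique entry at key c changes the nonzero count by the obvious amount
lemma countP_map_replace (l : List (Char × Int)) (hnd : (l.map Prod.fst).Nodup)
    (c : Char) (old nw : Int) (hmem : (c, old) ∈ l) :
    ((l.map (fun p => if p.1 == c then (c, nw) else p)).countP (fun p => !(p.2 == 0))
       : Int) + (if old = 0 then 0 else 1)
    = (l.countP (fun p => !(p.2 == 0)) : Int) + (if nw = 0 then 0 else 1) := by
  induction l with
  | nil => simp at hmem
  | cons hd tl ih =>
    simp only [List.map_cons, List.nodup_cons] at hnd
    rw [List.mem_cons] at hmem
    by_cases hk : hd.1 = c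
    · have hdeq : hd = (c, old) := by
        rcases hmem with h | h
        · exact h.symm
        · exact absurd (hk ▸ List.mem_map_of_mem (f := Prod.fst) h) hnd.1
      subst hdeq
      have hrest : tl.map (fun p => if p.1 == c then (c, nw) else p) = tl := by
        conv_rhs => rw [← List.map_id tl]
        apply List.map_congr_left
        intro p hp
        have : p.1 ≠ c := by
          intro hpc
          have hm : p.1 ∈ tl.map Prod.fst := List.mem_map_of_mem hp
          rw [hpc] at hm; exact hnd.1 hm
        simp [this]
      simp only [List.map_cons, beq_self_eq_true, if_pos, List.countP_cons, hrest]
      by_cases h0 : old = 0 <;> by_cases h1 : nw = 0 <;>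
        simp [h0, h1, List.countP_cons] <;> push_cast <;> ring
    · rcases hmem with h | h
      · exact absurd (congrArg Prod.fst h.symm) hk
      · have := ih hnd.2 h
        simp only [List.map_cons, List.countP_cons]
        have hkb : (hd.1 == c) = false := by simp [hk]
        simp only [hkb, if_neg, Bool.false_eq_true]
        by_cases h2 : hd.2 = 0 <;> simp [h2] at this ⊢ <;> push_cast at this ⊢ <;> omega

lemma pvAdjust_inv {d mis} {f : Char → Int} (h : DInv d mis f) (c : Char) (δ : Int) :
    DInv (pvAdjust d mis c δ).1 (pvAdjust d mis c δ).2 (Function.update f c (f c + δ)) := by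
  obtain ⟨hnd, hget, hmis⟩ := h
  unfold pvAdjust
  simp only
  refine ⟨PySem.Dict.nodup_keys_insert d c _ hnd, ?_, ?_⟩
  · intro c'
    rw [PySem.Dict.getD_insert]
    by_cases hc : c' = c
    · simp [hc, hget c, Function.update]
    · simp [hc, hget c', Function.update]
  · rw [hget c]
    by_cases hcon : d.contains c
    · -- key present: items are mapped in place
      rw [PySem.Dict.items_insert]
      simp only [hcon, if_pos]
      have hv : (c, f c) ∈ d.items := by
        rw [← PySem.Dict.get?_eq_some_iff_mem_items d c (f c) hnd]
        rcases Option.isSome_iff_exists.mp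
          (by rw [← PySem.Dict.contains_eq_isSome_get? d c]; exact hcon) with ⟨v, hvv⟩
        rw [hvv]
        have := PySem.Dict.getD_of_get?_eq_some d 0 hvv
        rw [hget c] at this; rw [this]
      have := countP_map_replace d.items (by exact hnd) c (f c) (f c + δ) hv
      by_cases h0 : f c = 0 <;> by_cases h1 : f c + δ = 0 <;>
        simp [h0, h1] at this ⊢ <;> omega
    · -- new key: items append
      have hget0 : f c = 0 := by
        rw [← hget c]; exact PySem.Dict.getD_of_not_contains d 0 (by simpa using hcon)
      rw [PySem.Dict.items_insert]
      simp only [hcon, if_neg, Bool.false_eq_true, List.countP_append]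
      by_cases h1 : f c + δ = 0 <;> simp [hget0, h1, List.countP_cons] <;> omega

lemma DInv_mis_zero {d mis} {f : Char → Int} (h : DInv d mis f) :
    mis = 0 ↔ ∀ c, f c = 0 := by
  obtain ⟨hnd, hget, hmis⟩ := h
  rw [hmis]
  constructor
  · intro h0 c
    have hcount : d.items.countP (fun p => !(p.2 == 0)) = 0 := by exact_mod_cast h0
    rw [List.countP_eq_zero] at hcount
    rw [← hget c]
    by_cases hcon : d.contains c
    · rcases Option.isSome_iff_exists.mp
        (by rw [← PySem.Dict.contains_eq_isSome_get? d c]; exact hcon) with ⟨v, hvv⟩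
      rw [PySem.Dict.getD_of_get?_eq_some d 0 hvv]
      have := hcount _ (PySem.Dict.mem_items_of_get?_eq_some d hvv)
      simpa using this
    · exact PySem.Dict.getD_of_not_contains d 0 (by simpa using hcon)
  · intro hz
    have : d.items.countP (fun p => !(p.2 == 0)) = 0 := by
      rw [List.countP_eq_zero]
      intro p hp
      have : d.getD p.1 0 = p.2 := PySem.Dict.getD_of_mem_items d (by exact hp) hnd 0
      rw [hget p.1] at this
      simp [← this, hz p.1]
    simp [this]

-- the per-window tests agree
lemma check_eq {d mis} {W T f : Char → Int} (h : DInv d mis f)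
    (hf : ∀ c, f c = W c - T c) (hbig : ∀ c : Char, 128 ≤ c.toNat → W c = T c) :
    (mkArr W == mkArr T) = (mis == 0) := by
  have key : ((mkArr W == mkArr T) = true) ↔ ((mis == 0) = true) := by
    rw [mkArr_beq, beq_iff_eq, DInv_mis_zero h]
    constructor
    · intro hlt c
      rw [hf c]
      by_cases hc : c.toNat < 128
      · rw [hlt c hc]; ring
      · rw [hbig c (by omega)]; ring
    · intro hz c _
      have := hz c; rw [hf c] at this; omega
  cases hb : (mkArr W == mkArr T) <;> cases hm : (mis == 0) <;> simp_all

-- fold of pvAdjust over a char list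
lemma foldl_pvAdjust {δ : Int} (l : List Char) {d mis} {f : Char → Int} (h : DInv d mis f) :
    DInv (l.foldl (fun s c => pvAdjust s.1 s.2 c δ) (d, mis)).1
         (l.foldl (fun s c => pvAdjust s.1 s.2 c δ) (d, mis)).2
         (fun c => f c + δ * l.count c) := by
  induction l generalizing d mis f with
  | nil => simpa using h
  | cons c tl ih =>
    simp only [List.foldl_cons]
    refine DInv_congr (ih (d := (pvAdjust d mis c δ).1) (mis := (pvAdjust d mis c δ).2)
      (pvAdjust_inv h c δ)) ?_
    intro c'
    simp only [Function.update, List.count_cons]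
    split_ifs with h1 <;> simp_all <;> push_cast <;> ring

-- fold of pvBump (+1) over a char list, on the array side
lemma foldl_pvBump (l : List Char) (f : Char → Int) (hl : ∀ c ∈ l, c.toNat < 128) :
    l.foldl (fun a c => pvBump a c.toNat 1) (mkArr f) = mkArr (fun c => f c + l.count c) := by
  induction l generalizing f with
  | nil =>
    simp only [List.foldl_nil]
    exact (mkArr_congr (fun c => by simp)).symm
  | cons c tl ih =>
    simp only [List.foldl_cons]
    rw [pvBump_mkArr f c (hl c (by simp)) 1,
        ih _ (fun c' hc' => hl c' (List.mem_cons_of_mem _ hc'))]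
    refine mkArr_congr ?_
    intro c'
    simp only [Function.update, List.count_cons]
    split_ifs with h1 <;> simp_all <;> push_cast <;> ring

-- a fold over range(len l) reading l.getD is a fold over l
lemma foldl_range_getD {β σ : Type} (l : List β) (g : σ → β → σ) (dflt : β) (s : σ) :
    (List.range l.length).foldl (fun s k => g s (l.getD k dflt)) s = l.foldl g s := by
  induction l using List.reverseRecOn generalizing s with
  | nil => simp
  | append_singleton l x ih =>
    rw [List.length_append, List.length_singleton, List.range_succ]
    rw [List.foldl_append, List.foldl_append]
    have hbody : (List.range l.length).foldl
        (fun s k => g s ((l ++ [x]).getD k dflt)) s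
        = (List.range l.length).foldl (fun s k => g s (l.getD k dflt)) s := by
      apply PySem.List.foldl_congr_mem
      intro acc k hk
      rw [List.mem_range] at hk
      simp [List.getD, List.getElem?_append_left hk]
    rw [hbody, ih]
    simp [List.getD, List.getElem?_append_right (le_refl l.length)]

-- main slide-loop induction
lemma slide_eq (pairs : List (Char × Char)) :
    ∀ (W T f : Char → Int) (d : PySem.Dict Char Int) (mis cnt : Int)
      (hcode : ∀ p ∈ pairs, p.1.toNat < 128 ∧ p.2.toNat < 128)
      (hbig : ∀ c : Char, 128 ≤ c.toNat → W c = 0 ∧ T c = 0)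
      (hinv : DInv d mis f) (hf : ∀ c, f c = W c - T c),
    (pairs.foldl
      (fun (q : List Int × Int) pr =>
        let tc := pvBump q.1 pr.1.toNat 1
        let tc2 := pvBump tc pr.2.toNat (-1)
        (tc2, if mkArr W == tc2 then q.2 + 1 else q.2))
      (mkArr T, cnt)).2
    = (pairs.foldl
      (fun (r : (PySem.Dict Char Int × Int) × Int) pr =>
        let s := pvAdjust r.1.1 r.1.2 pr.1 (-1)
        let s' := pvAdjust s.1 s.2 pr.2 1
        (s', if s'.2 == 0 then r.2 + 1 else r.2))
      ((d, mis), cnt)).2 := by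
  induction pairs with
  | nil => intro _ _ _ _ _ _ _ _ _ _; rfl
  | cons pr tl ih =>
    intro W T f d mis cnt hcode hbig hinv hf
    obtain ⟨cin, cout⟩ := pr
    have hmem : (cin, cout) ∈ (cin, cout) :: tl := List.mem_cons_self
    have hcin : cin.toNat < 128 := (hcode _ hmem).1
    have hcout : cout.toNat < 128 := (hcode _ hmem).2
    simp only [List.foldl_cons]
    -- abbreviations for the updated count functions
    set T1 : Char → Int := Function.update T cin (T cin + 1) with hT1
    set T2 : Char → Int := Function.update T1 cout (T1 cout + (-1)) with hT2
    have hA1 : pvBump (mkArr T) cin.toNat 1 = mkArr T1 := pvBump_mkArr T cin hcin 1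
    have hA2 : pvBump (mkArr T1) cout.toNat (-1) = mkArr T2 := pvBump_mkArr T1 cout hcout (-1)
    have hB1 := pvAdjust_inv hinv cin (-1)
    have hB2 := pvAdjust_inv hB1 cout 1
    set f1 : Char → Int := Function.update f cin (f cin + (-1)) with hf1
    set f2 : Char → Int := Function.update f1 cout (f1 cout + 1) with hf2
    have hf2' : ∀ c, f2 c = W c - T2 c := by
      intro c
      have e1 := hf c; have e2 := hf cin; have e3 := hf cout
      simp only [hf2, hf1, hT2, hT1, Function.update_apply]
      split_ifs <;> simp_all <;> ring
    have hbig2 : ∀ c : Char, 128 ≤ c.toNat → W c = 0 ∧ T2 c = 0 := by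
      intro c hc
      have hne1 : c ≠ cin := by intro h; rw [h] at hc; omega
      have hne2 : c ≠ cout := by intro h; rw [h] at hc; omega
      refine ⟨(hbig c hc).1, ?_⟩
      simp only [hT2, hT1, Function.update_apply, if_neg hne1, if_neg hne2]
      exact (hbig c hc).2
    have hcheck : (mkArr W == mkArr T2) = ((pvAdjust (pvAdjust d mis cin (-1)).1 (pvAdjust d mis cin (-1)).2 cout 1).2 == 0) :=
      check_eq hB2 hf2' (fun c hc => by rw [(hbig2 c hc).1, (hbig2 c hc).2])
    rw [hA1, hA2, hcheck]
    have := ih W T2 f2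
      (pvAdjust (pvAdjust d mis cin (-1)).1 (pvAdjust d mis cin (-1)).2 cout 1).1
      (pvAdjust (pvAdjust d mis cin (-1)).1 (pvAdjust d mis cin (-1)).2 cout 1).2
      (if ((pvAdjust (pvAdjust d mis cin (-1)).1 (pvAdjust d mis cin (-1)).2 cout 1).2 == 0)
        then cnt + 1 else cnt)
      (fun p hp => hcode p (List.mem_cons_of_mem _ hp))
      hbig2 hB2 hf2'
    simpa using this

-- ===== VERDICT (by name: the statement is the Claim_ definition above) =====
theorem search_anagram_spec : Claim_equal_search_anagram := by
  intro word text hdom hpre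
  unfold Spec_search_anagram
  unfold Pre_search_anagram at hpre
  unfold Dom_search_anagram at hdom
  simp only [Bool.and_eq_true, pvDomStr, List.all_eq_true] at hdom
  simp only [search_anagram, search_anagram_alt]
  set w := word.toList with hw_def
  set t := text.toList with ht_def
  set m := w.length with hm_def
  set n := t.length with hn_def
  have hwc : ∀ c ∈ w, c.toNat < 128 := by
    intro c hc
    have := hdom.1 c hc
    simp only [pvDomChar, Bool.or_eq_true, Bool.and_eq_true, decide_eq_true_eq,
      beq_iff_eq] at this
    omega
  have htc : ∀ c ∈ t, c.toNat < 128 := by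
    intro c hc
    have := hdom.2 c hc
    simp only [pvDomChar, Bool.or_eq_true, Bool.and_eq_true, decide_eq_true_eq,
      beq_iff_eq] at this
    omega
  have hmn : m ≤ n := hpre
  rw [if_neg (by omega : ¬ m > n)]
  -- abstract count functions
  set W : Char → Int := fun c => (w.count c : Int) with hW_def
  set T0 : Char → Int := fun c => ((t.take m).count c : Int) with hT0_def
  -- ===== A: first loop =====
  have e0 : PySem.List.pyRange 0 (m : Int) 1 = (List.range m).map Int.ofNat := by
    apply List.ext_getElem
    · simp [PySem.List.length_pyRange_one]
    · intro i h1 h2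
      simp [PySem.List.getElem_pyRange_one]
  have hA1 : (PySem.List.pyRange 0 (m : Int) 1).foldl
      (fun (p : List Int × List Int) i =>
        (pvBump p.1 (PySem.List.pyGetD w i ' ').toNat 1,
         pvBump p.2 (PySem.List.pyGetD t i ' ').toNat 1))
      (List.replicate 128 0, List.replicate 128 0) = (mkArr W, mkArr T0) := by
    rw [e0, List.foldl_map]
    simp only [Int.ofNat_eq_natCast, PySem.List.pyGetD_natCast]
    rw [PySem.List.foldl_prod_mk (f := fun a k => pvBump a ((w.getD k ' ').toNat) 1)
        (g := fun a k => pvBump a ((t.getD k ' ').toNat) 1)]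
    rw [replicate_eq_mkArr]
    simp only [Prod.mk.injEq]
    constructor
    · rw [hm_def, foldl_range_getD w (fun a c => pvBump a c.toNat 1) ' ',
        foldl_pvBump w _ hwc]
      exact mkArr_congr (fun c => by rw [hW_def]; ring)
    · have hcg : (List.range m).foldl (fun a k => pvBump a ((t.getD k ' ').toNat) 1) (mkArr fun _ => 0)
          = (List.range m).foldl (fun a k => pvBump a (((t.take m).getD k ' ').toNat) 1) (mkArr fun _ => 0) := by
        apply PySem.List.foldl_congr_mem
        intro acc k hk
        rw [List.mem_range] at hk
        simp [List.getD, List.getElem?_take_of_lt hk]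
      rw [hcg]
      have hlen : List.range m = List.range (t.take m).length := by
        have : (t.take m).length = m := by simp [hn_def] at hmn ⊢; omega
        rw [this]
      rw [hlen, foldl_range_getD (t.take m) (fun a c => pvBump a c.toNat 1) ' ',
        foldl_pvBump (t.take m) _ (fun c hc => htc c (List.mem_of_mem_take hc))]
      exact mkArr_congr (fun c => by rw [hT0_def]; ring)
  rw [hA1]
  -- ===== B: building the difference dict =====
  have hB1 := foldl_pvAdjust (δ := 1) w DInv_empty
  have hB2' := foldl_pvAdjust (δ := -1) (t.take m)
      (DInv_congr hB1 (fun c => by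
        show (0 : Int) + 1 * ↑(w.count c) = W c
        rw [hW_def]; push_cast; ring))
  rw [PySem.List.slice_to_natCast, PySem.List.slice_from_natCast]
  set s2 := List.foldl (fun s c => pvAdjust s.1 s.2 c (-1))
      (List.foldl (fun s c => pvAdjust s.1 s.2 c 1) (PySem.Dict.empty, 0) w) (List.take m t)
    with hs2_def
  have hB2 : DInv s2.1 s2.2 (fun c => W c - T0 c) := by
    refine DInv_congr ?_ (fun c => by
      show W c + -1 * ((t.take m).count c : Int) = W c - T0 c
      rw [hT0_def]; ring)
    exact hB2'
  have hbig0 : ∀ c : Char, 128 ≤ c.toNat → W c = 0 ∧ T0 c = 0 := by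
    intro c hc
    have hcw : c ∉ w := fun hmm => by have := hwc c hmm; omega
    have hct : c ∉ t.take m := fun hmm => by have := htc c (List.mem_of_mem_take hmm); omega
    constructor
    · rw [hW_def]; simp [List.count_eq_zero_of_not_mem hcw]
    · rw [hT0_def]; simp [List.count_eq_zero_of_not_mem hct]
  have hcnt : (mkArr W == mkArr T0) = (s2.2 == 0) :=
    check_eq hB2 (fun c => rfl) (fun c hc => by rw [(hbig0 c hc).1, (hbig0 c hc).2])
  simp only []
  rw [hcnt]
  set pairs := (t.drop m).zip t with hpairs_def
  have hplen : pairs.length = n - m := by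
    rw [hpairs_def, List.length_zip, List.length_drop]
    omega
  have hpget : ∀ k, k < n - m → pairs.getD k (' ', ' ') = (t.getD (m + k) ' ', t.getD k ' ') := by
    intro k hk
    have hk1 : k < pairs.length := by omega
    have hk2 : m + k < n := by omega
    have hk3 : k < n := by omega
    rw [List.getD_eq_getElem _ _ hk1]
    rw [List.getD_eq_getElem _ _ (by omega : m + k < t.length),
        List.getD_eq_getElem _ _ (by omega : k < t.length)]
    simp only [hpairs_def]
    simp [List.getElem_zip, List.getElem_drop]
  have hconv :
      (PySem.List.pyRange (m : Int) (n : Int) 1).foldl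
        (fun (q : List Int × Int) i =>
          (pvBump (pvBump q.1 (PySem.List.pyGetD t i ' ').toNat 1)
              (PySem.List.pyGetD t (i - (m : Int)) ' ').toNat (-1),
            if (mkArr W == pvBump (pvBump q.1 (PySem.List.pyGetD t i ' ').toNat 1)
                (PySem.List.pyGetD t (i - (m : Int)) ' ').toNat (-1)) = true
            then q.2 + 1 else q.2))
        (mkArr T0, if (s2.2 == 0) = true then 1 else 0)
      = pairs.foldl
        (fun (q : List Int × Int) pr =>
          (pvBump (pvBump q.1 pr.1.toNat 1) pr.2.toNat (-1),
            if (mkArr W == pvBump (pvBump q.1 pr.1.toNat 1) pr.2.toNat (-1)) = true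
            then q.2 + 1 else q.2))
        (mkArr T0, if (s2.2 == 0) = true then 1 else 0) := by
    rw [PySem.List.pyRange_one]
    have hnm : (((n : Int)) - ((m : Int))).toNat = n - m := by omega
    rw [hnm, List.foldl_map]
    have hcong := PySem.List.foldl_congr_mem (List.range (n - m))
      (fun (q : List Int × Int) (k : Nat) =>
          (pvBump (pvBump q.1 (PySem.List.pyGetD t ((m : Int) + (k : Int)) ' ').toNat 1)
              (PySem.List.pyGetD t (((m : Int) + (k : Int)) - (m : Int)) ' ').toNat (-1),
            if (mkArr W == pvBump (pvBump q.1 (PySem.List.pyGetD t ((m : Int) + (k : Int)) ' ').toNat 1)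
                (PySem.List.pyGetD t (((m : Int) + (k : Int)) - (m : Int)) ' ').toNat (-1)) = true
            then q.2 + 1 else q.2))
      (fun (q : List Int × Int) (k : Nat) =>
          (pvBump (pvBump q.1 (pairs.getD k (' ', ' ')).1.toNat 1) (pairs.getD k (' ', ' ')).2.toNat (-1),
            if (mkArr W == pvBump (pvBump q.1 (pairs.getD k (' ', ' ')).1.toNat 1)
                (pairs.getD k (' ', ' ')).2.toNat (-1)) = true
            then q.2 + 1 else q.2))
      (mkArr T0, if (s2.2 == 0) = true then 1 else 0)
      (by
        intro acc k hk
        rw [List.mem_range] at hk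
        have h1 : ((m : Int) + (k : Int)) - (m : Int) = (k : Int) := by ring
        have h2 : ((m : Int) + (k : Int)) = ((m + k : Nat) : Int) := by push_cast; ring
        beta_reduce
        rw [h1, h2]
        simp only [PySem.List.pyGetD_natCast]
        rw [hpget k hk])
    rw [hcong]
    have hrange : List.range (n - m) = List.range pairs.length := by rw [hplen]
    rw [hrange, foldl_range_getD pairs
      (fun (q : List Int × Int) (pr : Char × Char) =>
          (pvBump (pvBump q.1 pr.1.toNat 1) pr.2.toNat (-1),
            if (mkArr W == pvBump (pvBump q.1 pr.1.toNat 1) pr.2.toNat (-1)) = true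
            then q.2 + 1 else q.2)) (' ', ' ')]
  rw [hconv]
  have hcode : ∀ p ∈ pairs, p.1.toNat < 128 ∧ p.2.toNat < 128 := by
    intro p hp
    rw [hpairs_def] at hp
    have := List.of_mem_zip hp
    exact ⟨htc p.1 (List.mem_of_mem_drop this.1), htc p.2 this.2⟩
  have hsl := slide_eq pairs W T0 (fun c => W c - T0 c) s2.1 s2.2
    (if (s2.2 == 0) = true then 1 else 0) hcode hbig0 hB2 (fun c => rfl)
  rw [Prod.mk.eta] at hsl
  exact hsl
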